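-- pv_equiv track=rewrite | github.com/s-du/SkySpectral | gui/dialogs.py | is_formula_correct
-- ===== SOURCE A (Python) =====
-- def is_formula_correct(formula):
--     # Check for balanced parentheses
--     if formula.count('(') != formula.count(')'):
--         return False
--
--     # Check for incompatible operators
--     operators = ['+', '-', '*', '/', '^', 'sqrt', 'sin', 'asin', 'log', 'cos', 'acos', 'tan', 'atan', 'exp']
--     for op in operators:
--         if formula.endswith(op) or formula.startswith(op):
--             return False
--         for op2 in operators:
--             if op + op2 in formula or op2 + op in formula:
--                 return False
--
--     # Check for adjacent bands without an operator in between
--     bands = ['B', 'G', 'PAN', 'R', 'RE', 'NIR']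
--     for band1 in bands:
--         for band2 in bands:
--             pattern = band1 + band2
--             if pattern in formula:
--                 return False
--
--     return True
-- ===== SOURCE B (Python) =====
-- def is_formula_correct(formula):
--     # One left-to-right scan over positions (token lookahead) instead of
--     # probing every token-pair concatenation as a substring.
--     if formula.count('(') != formula.count(')'):
--         return False
--     operators = ('+', '-', '*', '/', '^', 'sqrt', 'sin', 'asin', 'log', 'cos', 'acos', 'tan', 'atan', 'exp')
--     bands = ('B', 'G', 'PAN', 'R', 'RE', 'NIR')
--     if formula.startswith(operators) or formula.endswith(operators):
--         return False
--     for i in range(len(formula)):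
--         for toks in (operators, bands):
--             for t in toks:
--                 if formula.startswith(t, i) and formula.startswith(toks, i + len(t)):
--                     return False
--     return True
-- ===== Notes on version B (the rewrite author's own statement) =====
-- stated objective: alternative
-- what changed: Instead of probing every operator-pair and band-pair concatenation as a substring (hundreds of full-string 'in' searches), B makes one left-to-right scan over the string's positions and checks token lookahead (token starting at i followed immediately by another token of the same class), with the start/end check done once via startswith/endswith on a tuple.
import Mathlib
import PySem

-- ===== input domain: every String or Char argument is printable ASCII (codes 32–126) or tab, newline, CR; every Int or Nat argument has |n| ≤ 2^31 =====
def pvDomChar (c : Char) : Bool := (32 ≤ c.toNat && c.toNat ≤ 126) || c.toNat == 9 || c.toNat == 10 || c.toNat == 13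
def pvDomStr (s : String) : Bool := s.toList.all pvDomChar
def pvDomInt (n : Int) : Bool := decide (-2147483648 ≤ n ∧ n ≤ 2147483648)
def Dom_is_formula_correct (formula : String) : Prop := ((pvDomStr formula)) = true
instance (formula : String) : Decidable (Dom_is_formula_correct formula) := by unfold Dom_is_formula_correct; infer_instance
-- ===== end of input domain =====

-- B replaces A's O(|tokens|^2) substring probes by one left-to-right scan over the
-- string's positions with token lookahead (objective: alternative; same return value).

-- shared token tables (data literals of both Pythons)
def pvOps : List (List Char) :=
  [['+'], ['-'], ['*'], ['/'], ['^'], ['s','q','r','t'], ['s','i','n'], ['a','s','i','n'],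
   ['l','o','g'], ['c','o','s'], ['a','c','o','s'], ['t','a','n'], ['a','t','a','n'], ['e','x','p']]
def pvBands : List (List Char) :=
  [['B'], ['G'], ['P','A','N'], ['R'], ['R','E'], ['N','I','R']]

-- ===== PORT A =====
def is_formula_correct (formula : String) : Bool :=
  let s := formula.toList
  if PySem.Chars.count s ['('] ≠ PySem.Chars.count s [')'] then false
  else if pvOps.any (fun op =>
      PySem.Chars.endswith s op || PySem.Chars.startswith s op ||
      pvOps.any (fun op2 =>
        PySem.Chars.isIn (op ++ op2) s || PySem.Chars.isIn (op2 ++ op) s)) then false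
  else if pvBands.any (fun b1 => pvBands.any (fun b2 =>
      PySem.Chars.isIn (b1 ++ b2) s)) then false
  else true

-- ===== PORT B =====
-- formula.startswith(tuple(toks), i): for 0 ≤ i Python tests each token against s[i:],
-- which is exactly 'prefix of s.drop i' — ported by hand via Chars.startswith on the drop.
def pvTokAt (s : List Char) (toks : List (List Char)) (i : Nat) : Bool :=
  toks.any (fun t => PySem.Chars.startswith (s.drop i) t)

def pvPairAt (s : List Char) (toks : List (List Char)) (i : Nat) : Bool :=
  toks.any (fun t => PySem.Chars.startswith (s.drop i) t && pvTokAt s toks (i + t.length))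

def is_formula_correct_alt (formula : String) : Bool :=
  let s := formula.toList
  if PySem.Chars.count s ['('] ≠ PySem.Chars.count s [')'] then false
  else if pvTokAt s pvOps 0 || pvOps.any (fun t => PySem.Chars.endswith s t) then false
  else if (List.range s.length).any (fun i =>
      pvPairAt s pvOps i || pvPairAt s pvBands i) then false
  else true

-- ===== PRECONDITION & SPEC =====
def Spec_is_formula_correct (formula : String) (out : Bool) : Prop := out = is_formula_correct_alt formula
instance (formula : String) (out : Bool) : Decidable (Spec_is_formula_correct formula out) := by unfold Spec_is_formula_correct; infer_instance

-- ===== CLAIM (what is proved, stated in full; the proofs are below) =====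
def Claim_equal_is_formula_correct : Prop := ∀ (formula : String), Dom_is_formula_correct formula → Spec_is_formula_correct formula (is_formula_correct formula)

-- ===== LEMMAS AND PROOFS =====

-- a ++ b occurs as a prefix of l iff a does and b does right after it
theorem pvAppendPrefixIff (a b l : List Char) :
    (a ++ b) <+: l ↔ a <+: l ∧ b <+: l.drop a.length := by
  constructor
  · rintro ⟨t, ht⟩
    have hl : l = a ++ (b ++ t) := by rw [← ht]; simp
    subst hl
    exact ⟨⟨b ++ t, rfl⟩, by rw [List.drop_left]; exact ⟨t, rfl⟩⟩
  · rintro ⟨⟨u, hu⟩, hb⟩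
    subst hu
    rw [List.drop_left] at hb
    obtain ⟨v, hv⟩ := hb
    exact ⟨v, by rw [← hv]; simp⟩

-- a token-pair concatenation is a substring iff at some position both tokens line up
theorem pvPairScanIff (s : List Char) (toks : List (List Char)) (h : ∀ t ∈ toks, t ≠ []) :
    ((toks.any fun a => toks.any fun b => PySem.Chars.isIn (a ++ b) s) = true) ↔
    (((List.range s.length).any fun i => pvPairAt s toks i) = true) := by
  simp only [List.any_eq_true, pvPairAt, pvTokAt, Bool.and_eq_true, List.mem_range,
    PySem.Chars.startswith_iff]
  constructor
  · rintro ⟨a, ha, b, hb, hin⟩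
    obtain ⟨j, hj⟩ := (PySem.Chars.exists_prefix_drop_iff_isIn (a ++ b) s).mpr hin
    obtain ⟨hpa, hpb⟩ := (pvAppendPrefixIff a b (s.drop j)).mp hj
    rw [List.drop_drop] at hpb
    have hlen : a.length ≤ (s.drop j).length := hpa.length_le
    have hane : a.length ≠ 0 := by
      simpa [List.length_eq_zero_iff] using h a ha
    have hjlt : j < s.length := by
      simp only [List.length_drop] at hlen; omega
    exact ⟨j, hjlt, a, ha, hpa, b, hb, hpb⟩
  · rintro ⟨i, _, a, ha, hpa, b, hb, hpb⟩
    refine ⟨a, ha, b, hb, ?_⟩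
    apply (PySem.Chars.exists_prefix_drop_iff_isIn (a ++ b) s).mp
    refine ⟨i, (pvAppendPrefixIff a b (s.drop i)).mpr ⟨hpa, ?_⟩⟩
    rw [List.drop_drop]
    exact hpb

-- value of the two trailing if-branches depends only on the disjunction of the tests
theorem pvIte2 (b c b' c' : Bool) (h : (b || c) = (b' || c')) :
    (if b then false else if c then false else true) =
    (if b' then false else if c' then false else true) := by
  cases b <;> cases b' <;> cases c <;> cases c' <;> simp_all

-- ===== VERDICT (by name: the statement is the Claim_ definition above) =====
theorem is_formula_correct_spec : Claim_equal_is_formula_correct := by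
  intro formula _
  unfold Spec_is_formula_correct is_formula_correct is_formula_correct_alt
  by_cases hc : PySem.Chars.count formula.toList ['('] ≠ PySem.Chars.count formula.toList [')']
  · simp [hc]
  · simp only [hc, if_false]
    apply pvIte2
    rw [Bool.eq_iff_iff]
    have hops := pvPairScanIff formula.toList pvOps (by decide)
    have hbands := pvPairScanIff formula.toList pvBands (by decide)
    simp only [List.any_eq_true, Bool.or_eq_true] at hops hbands ⊢
    have hS : (pvTokAt formula.toList pvOps 0 = true) ↔
        ∃ t ∈ pvOps, PySem.Chars.startswith formula.toList t = true := by
      simp [pvTokAt, List.any_eq_true]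
    rw [hS]
    constructor
    · rintro (⟨op, hop, (hend | hstart) | ⟨op2, hop2, h12 | h21⟩⟩ | ⟨b1, h1, b2, h2, hin⟩)
      · exact Or.inl (Or.inr ⟨op, hop, hend⟩)
      · exact Or.inl (Or.inl ⟨op, hop, hstart⟩)
      · obtain ⟨i, hi, hp⟩ := hops.mp ⟨op, hop, op2, hop2, h12⟩
        exact Or.inr ⟨i, hi, Or.inl hp⟩
      · obtain ⟨i, hi, hp⟩ := hops.mp ⟨op2, hop2, op, hop, h21⟩
        exact Or.inr ⟨i, hi, Or.inl hp⟩
      · obtain ⟨i, hi, hp⟩ := hbands.mp ⟨b1, h1, b2, h2, hin⟩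
        exact Or.inr ⟨i, hi, Or.inr hp⟩
    · rintro ((⟨t, ht, hst⟩ | ⟨t, ht, hend⟩) | ⟨i, hi, hp | hp⟩)
      · exact Or.inl ⟨t, ht, Or.inl (Or.inr hst)⟩
      · exact Or.inl ⟨t, ht, Or.inl (Or.inl hend)⟩
      · obtain ⟨a, ha, b, hb, hin⟩ := hops.mpr ⟨i, hi, hp⟩
        exact Or.inl ⟨a, ha, Or.inr ⟨b, hb, Or.inl hin⟩⟩
      · exact Or.inr (hbands.mpr ⟨i, hi, hp⟩)
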